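-- pv_equiv track=rewrite | github.com/aria1th/Torus-Hamilton-Decomposition | scripts/torus_nd_hyperplane_fusion_search.py | _matching_perm_indices
-- ===== SOURCE A (Python) =====
-- from typing import Dict, Iterable, List, Sequence, Tuple
--
-- DIM = 4
--
-- DirectionTuple = Tuple[int, ...]
--
-- def _matching_perm_indices(perms: Sequence[DirectionTuple]) -> Dict[Tuple[int, int], List[int]]:
--     out: Dict[Tuple[int, int], List[int]] = {}
--     for color in range(DIM):
--         for direction in range(DIM):
--             out[(color, direction)] = [
--                 perm_idx for perm_idx, perm in enumerate(perms) if perm[color] == direction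
--             ]
--     return out
-- ===== SOURCE B (Python) =====
-- DIM = 4
--
-- def _matching_perm_indices(perms):
--     # One pass over perms instead of 16 rescans; buckets pre-created in (color, direction) order.
--     out = {(color, direction): [] for color in range(DIM) for direction in range(DIM)}
--     for perm_idx, perm in enumerate(perms):
--         for color in range(DIM):
--             val = perm[color]
--             if 0 <= val < DIM:
--                 out[(color, val)].append(perm_idx)
--     return out
-- ===== Notes on version B (the rewrite author's own statement) =====
-- stated objective: alternative
-- what changed: Instead of 16 separate rescans of perms (one list comprehension per (color, direction) key), B pre-creates all 16 empty buckets in the same key order and fills them in a single pass over perms, appending each index to bucket (color, perm[color]) when the value is in range.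
import Mathlib
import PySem

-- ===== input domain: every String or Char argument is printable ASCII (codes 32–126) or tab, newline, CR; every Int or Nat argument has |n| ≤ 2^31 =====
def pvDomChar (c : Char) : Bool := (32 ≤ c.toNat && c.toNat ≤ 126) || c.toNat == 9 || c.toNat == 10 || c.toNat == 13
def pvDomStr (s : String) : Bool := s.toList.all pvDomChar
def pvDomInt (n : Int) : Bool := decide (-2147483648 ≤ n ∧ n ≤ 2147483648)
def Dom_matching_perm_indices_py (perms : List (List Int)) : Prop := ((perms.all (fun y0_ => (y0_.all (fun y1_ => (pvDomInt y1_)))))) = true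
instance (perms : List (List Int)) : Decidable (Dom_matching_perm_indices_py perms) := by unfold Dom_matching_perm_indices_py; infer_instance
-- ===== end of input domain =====

-- B replaces A's 16 rescans of perms (one comprehension per (color, direction) key) by
-- pre-created empty buckets filled in a single pass over perms (alternative traversal, same cost).


-- ===== PORT A =====
-- dict with (color, direction) keys → PySem.Dict, its items flattened into the triple type;
-- perm[color] is pyGet? (none = IndexError, excluded by Pre_)
def matching_perm_indices_py (perms : List (List Int)) : List (Int × Int × List Int) :=
  let out : PySem.Dict (Int × Int) (List Int) :=
    (PySem.List.pyRange 0 4 1).foldl (fun out color =>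
      (PySem.List.pyRange 0 4 1).foldl (fun out direction =>
        out.insert (color, direction)
          (((PySem.List.enumerate perms 0).filter
              (fun p => PySem.List.pyGet? p.2 color == some direction)).map (fun p => p.1)))
        out)
      PySem.Dict.empty
  out.items.map (fun q => (q.1.1, q.1.2, q.2))

-- ===== PORT B =====
-- out = {(color, direction): [] for color in range(DIM) for direction in range(DIM)}
def bInit : PySem.Dict (Int × Int) (List Int) :=
  (PySem.List.pyRange 0 4 1).foldl (fun d color =>
    (PySem.List.pyRange 0 4 1).foldl (fun d direction => d.insert (color, direction) []) d)
    PySem.Dict.empty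

-- body of B's inner loop: val = perm[color]; if 0 <= val < DIM: out[(color, val)].append(perm_idx)
-- (pyGet? none = IndexError in Python, excluded by Pre_)
def bCol (p : Int × List Int) (d : PySem.Dict (Int × Int) (List Int)) (c : Int) :
    PySem.Dict (Int × Int) (List Int) :=
  match PySem.List.pyGet? p.2 c with
  | some v => if 0 ≤ v ∧ v < 4 then d.modify (c, v) [] (fun xs => xs ++ [p.1]) else d
  | none => d

-- B's loop body for one (perm_idx, perm) pair: for color in range(DIM): …
def bStep (d : PySem.Dict (Int × Int) (List Int)) (p : Int × List Int) :
    PySem.Dict (Int × Int) (List Int) :=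
  (PySem.List.pyRange 0 4 1).foldl (bCol p) d

def matching_perm_indices_py_alt (perms : List (List Int)) : List (Int × Int × List Int) :=
  ((PySem.List.enumerate perms 0).foldl bStep bInit).items.map (fun q => (q.1.1, q.1.2, q.2))

-- ===== PRECONDITION & SPEC =====
-- Pre_ excludes exactly the inputs where A raises IndexError (some perm shorter than DIM = 4);
-- B raises there too.
def Pre_matching_perm_indices_py (perms : List (List Int)) : Prop :=
  ∀ p ∈ perms, 4 ≤ p.length
instance (perms : List (List Int)) : Decidable (Pre_matching_perm_indices_py perms) := by
  unfold Pre_matching_perm_indices_py; infer_instance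

def pvWitness_matching_perm_indices_py : List (List Int) := [[0, 1, 2, 3], [2, 2, 7, -1]]

def Spec_matching_perm_indices_py (perms : List (List Int)) (out : List (Int × Int × List Int)) : Prop := out = matching_perm_indices_py_alt perms
instance (perms : List (List Int)) (out : List (Int × Int × List Int)) : Decidable (Spec_matching_perm_indices_py perms out) := by unfold Spec_matching_perm_indices_py; infer_instance

-- ===== CLAIM (what is proved, stated in full; the proofs are below) =====
def Claim_equal_matching_perm_indices_py : Prop := ∀ (perms : List (List Int)), Dom_matching_perm_indices_py perms → Pre_matching_perm_indices_py perms → Spec_matching_perm_indices_py perms (matching_perm_indices_py perms)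

-- ===== LEMMAS AND PROOFS =====

-- the bucket A builds for one (color, direction) key, generalized over the enumerate start s
def bucketG (l : List (List Int)) (s c dir : Int) : List Int :=
  ((PySem.List.enumerate l s).filter
      (fun p => PySem.List.pyGet? p.2 c == some dir)).map (fun p => p.1)

-- the 16 keys both dicts hold, in insertion order
def K16 : List (Int × Int) :=
  [(0,0),(0,1),(0,2),(0,3),(1,0),(1,1),(1,2),(1,3),(2,0),(2,1),(2,2),(2,3),(3,0),(3,1),(3,2),(3,3)]

lemma pyRange04 : PySem.List.pyRange 0 4 1 = [0, 1, 2, 3] := by decide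

lemma mem_K16 (c v : Int) (hc : 0 ≤ c ∧ c < 4) (hv : 0 ≤ v ∧ v < 4) : (c, v) ∈ K16 := by
  obtain ⟨h1, h2⟩ := hc; obtain ⟨h3, h4⟩ := hv
  interval_cases c <;> interval_cases v <;> decide

lemma bCol_keys (p : Int × List Int) (d : PySem.Dict (Int × Int) (List Int)) (c : Int)
    (hk : d.keys = K16) (hc : 0 ≤ c ∧ c < 4) : (bCol p d c).keys = K16 := by
  unfold bCol
  cases h : PySem.List.pyGet? p.2 c with
  | none => exact hk
  | some v =>
    simp only
    split_ifs with hg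
    · rw [PySem.Dict.keys_modify, PySem.Dict.keys_insert_of_contains, hk]
      rw [PySem.Dict.contains_iff_mem_keys, hk]
      exact mem_K16 c v hc hg
    · exact hk

lemma bCol_getD (p : Int × List Int) (d : PySem.Dict (Int × Int) (List Int)) (c c' dir : Int)
    (hp : 4 ≤ p.2.length) (hc : 0 ≤ c ∧ c < 4) (hdir : 0 ≤ dir ∧ dir < 4) :
    (bCol p d c).getD (c', dir) []
      = d.getD (c', dir) []
        ++ (if c' = c ∧ PySem.List.pyGet? p.2 c == some dir then [p.1] else []) := by
  unfold bCol
  have hr : PySem.List.pyGet? p.2 c = some (p.2[c.toNat]) := by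
    apply PySem.List.pyGet?_eq_some_getElem <;> omega
  rw [hr]
  simp only
  split_ifs with hg h2 h3
  · rw [PySem.Dict.getD_modify]
    obtain ⟨he, hv⟩ := h2
    simp only [beq_iff_eq, Option.some.injEq] at hv
    simp [he, hv]
  · rw [PySem.Dict.getD_modify]
    have : ¬ ((c', dir) = (c, p.2[c.toNat])) := by
      intro he; apply h2
      rw [Prod.mk.injEq] at he
      exact ⟨he.1, by simp [he.2]⟩
    simp [this]
  · exfalso
    obtain ⟨he, hv⟩ := h3
    simp only [beq_iff_eq, Option.some.injEq] at hv
    omega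
  · simp

lemma bStep_keys (d : PySem.Dict (Int × Int) (List Int)) (p : Int × List Int)
    (hk : d.keys = K16) : (bStep d p).keys = K16 := by
  unfold bStep
  rw [pyRange04]
  simp only [List.foldl]
  exact bCol_keys p _ 3
    (bCol_keys p _ 2 (bCol_keys p _ 1 (bCol_keys p _ 0 hk (by norm_num)) (by norm_num))
      (by norm_num)) (by norm_num)

lemma bStep_getD (d : PySem.Dict (Int × Int) (List Int)) (p : Int × List Int) (c dir : Int)
    (hp : 4 ≤ p.2.length) (hc : 0 ≤ c ∧ c < 4) (hdir : 0 ≤ dir ∧ dir < 4) :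
    (bStep d p).getD (c, dir) []
      = d.getD (c, dir) []
        ++ (if PySem.List.pyGet? p.2 c == some dir then [p.1] else []) := by
  unfold bStep
  rw [pyRange04]
  simp only [List.foldl]
  rw [bCol_getD p _ 3 c dir hp (by norm_num) hdir,
      bCol_getD p _ 2 c dir hp (by norm_num) hdir,
      bCol_getD p _ 1 c dir hp (by norm_num) hdir,
      bCol_getD p _ 0 c dir hp (by norm_num) hdir]
  obtain ⟨h1, h2⟩ := hc
  interval_cases c <;> simp

lemma bfold_getD (l : List (List Int)) (hl : ∀ q ∈ l, 4 ≤ q.length) (s : Int)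
    (d : PySem.Dict (Int × Int) (List Int)) (hk : d.keys = K16) (c dir : Int)
    (hc : 0 ≤ c ∧ c < 4) (hdir : 0 ≤ dir ∧ dir < 4) :
    ((PySem.List.enumerate l s).foldl bStep d).getD (c, dir) []
      = d.getD (c, dir) [] ++ bucketG l s c dir := by
  induction l generalizing s d with
  | nil => simp [bucketG, PySem.List.enumerate]
  | cons x l ih =>
    rw [PySem.List.enumerate_cons]
    simp only [List.foldl]
    rw [ih (fun q hq => hl q (by simp [hq])) (s + 1) _ (bStep_keys d (s, x) hk)]
    rw [bStep_getD d (s, x) c dir (hl x (by simp)) hc hdir]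
    have : bucketG (x :: l) s c dir
        = (if PySem.List.pyGet? x c == some dir then [s] else []) ++ bucketG l (s + 1) c dir := by
      simp only [bucketG, PySem.List.enumerate_cons, List.filter_cons]
      split_ifs with h <;> simp_all
    rw [this, List.append_assoc]

lemma bfold_keys (l : List (List Int)) (s : Int)
    (d : PySem.Dict (Int × Int) (List Int)) (hk : d.keys = K16) :
    ((PySem.List.enumerate l s).foldl bStep d).keys = K16 := by
  induction l generalizing s d with
  | nil => simpa [PySem.List.enumerate]
  | cons x l ih =>
    rw [PySem.List.enumerate_cons]
    simp only [List.foldl]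
    exact ih (s + 1) _ (bStep_keys d (s, x) hk)

lemma foldl_foldl {α β δ : Type} (g : δ → α → β → δ) (l₁ : List α) (l₂ : List β) (d : δ) :
    l₁.foldl (fun d c => l₂.foldl (fun d e => g d c e) d) d
      = (l₁.flatMap (fun c => l₂.map (fun e => (c, e)))).foldl (fun d p => g d p.1 p.2) d := by
  induction l₁ generalizing d with
  | nil => rfl
  | cons c l ih => simp [List.foldl_append, ih, List.foldl_map]

lemma K16_flat :
    ([0,1,2,3] : List Int).flatMap (fun c => ([0,1,2,3] : List Int).map (fun e => (c, e)))
      = K16 := by decide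

lemma insert16_items (V : Int → Int → List Int) :
    (K16.foldl (fun d p => d.insert (p.1, p.2) (V p.1 p.2))
        (PySem.Dict.empty : PySem.Dict (Int × Int) (List Int))).items
      = K16.map (fun a => ((a.1, a.2), V a.1 a.2)) := by
  rw [PySem.Dict.items_foldl_insert_fresh K16 (fun p => (p.1, p.2)) (fun p => V p.1 p.2)
      PySem.Dict.empty (fun a _ => PySem.Dict.contains_empty _) (by decide)]
  rfl

lemma A_eq (perms : List (List Int)) :
    matching_perm_indices_py perms
      = K16.map (fun a => (a.1, a.2, bucketG perms 0 a.1 a.2)) := by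
  unfold matching_perm_indices_py
  rw [pyRange04]
  simp only [foldl_foldl, K16_flat]
  rw [insert16_items (fun c e =>
    ((PySem.List.enumerate perms 0).filter
        (fun p => PySem.List.pyGet? p.2 c == some e)).map (fun p => p.1))]
  simp [bucketG]

lemma bInit_items : bInit.items = K16.map (fun a => ((a.1, a.2), ([] : List Int))) := by
  unfold bInit
  rw [pyRange04]
  simp only [foldl_foldl, K16_flat]
  exact insert16_items (fun _ _ => [])

lemma bInit_keys : bInit.keys = K16 := by
  show bInit.items.map Prod.fst = K16
  rw [bInit_items]
  decide

lemma bInit_getD (k : Int × Int) (hk : k ∈ K16) : bInit.getD k [] = [] := by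
  apply PySem.Dict.getD_of_mem_items
  · rw [bInit_items]
    exact List.mem_map.2 ⟨k, hk, rfl⟩
  · rw [bInit_keys]; decide

lemma B_eq (perms : List (List Int)) (hl : ∀ q ∈ perms, 4 ≤ q.length) :
    matching_perm_indices_py_alt perms
      = K16.map (fun a => (a.1, a.2, bucketG perms 0 a.1 a.2)) := by
  unfold matching_perm_indices_py_alt
  have hkeys : ((PySem.List.enumerate perms 0).foldl bStep bInit).keys = K16 :=
    bfold_keys perms 0 bInit bInit_keys
  rw [PySem.Dict.items_eq_map_keys _ (by rw [hkeys]; decide) []]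
  rw [hkeys, List.map_map]
  apply List.map_congr_left
  intro k hk
  obtain ⟨c, dir⟩ := k
  have hb : 0 ≤ c ∧ c < 4 ∧ 0 ≤ dir ∧ dir < 4 := by
    fin_cases hk <;> norm_num
  simp only [Function.comp]
  rw [bfold_getD perms hl 0 bInit bInit_keys c dir ⟨hb.1, hb.2.1⟩ ⟨hb.2.2.1, hb.2.2.2⟩,
      bInit_getD (c, dir) hk]
  rfl

-- ===== VERDICT (by name: the statement is the Claim_ definition above) =====
theorem matching_perm_indices_py_spec : Claim_equal_matching_perm_indices_py := by
  intro perms _ hpre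
  unfold Spec_matching_perm_indices_py
  rw [A_eq, B_eq perms hpre]
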